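-- pv_equiv track=rewrite | github.com/dispyfree/SPSS-BatchProcessor | batchProcessor.py | mergeLinesIntoCommands
-- ===== SOURCE A (Python) =====
-- def mergeLinesIntoCommands(lines):
--     """
--     A command may span several lines; merge parts from several lines into point-separated commands
--     :return: array of commands where each line corresponds to a command.
--     """
--     currentCommand = ""
--     ret = []
--
--     for line in lines:
--         currentCommand += " "
--         currentCommand += line
--         if(line[-1] == '.'):
--             ret.append(currentCommand)
--             currentCommand = ""
--
--     return ret
-- ===== SOURCE B (Python) =====
-- def mergeLinesIntoCommands(lines):
--     # Pass 1: indices of lines that terminate a command (end with '.').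
--     breaks = [i for i, line in enumerate(lines) if line[-1] == '.']
--     # Pass 2: slice the line list at those indices and render each group.
--     ret = []
--     start = 0
--     for i in breaks:
--         ret.append(''.join(' ' + l for l in lines[start:i + 1]))
--         start = i + 1
--     return ret
-- ===== Notes on version B (the rewrite author's own statement) =====
-- stated objective: alternative
-- what changed: Replaces A's single accumulator loop (growing a current-command string, flushing on '.') by two passes: first collect the indices of period-terminated lines, then slice the list between consecutive break indices and join each slice into a command.
-- outside the precondition, e.g. on mergeLinesIntoCommands(['a.', '']): A raises IndexError, B raises IndexError
import Mathlib
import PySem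

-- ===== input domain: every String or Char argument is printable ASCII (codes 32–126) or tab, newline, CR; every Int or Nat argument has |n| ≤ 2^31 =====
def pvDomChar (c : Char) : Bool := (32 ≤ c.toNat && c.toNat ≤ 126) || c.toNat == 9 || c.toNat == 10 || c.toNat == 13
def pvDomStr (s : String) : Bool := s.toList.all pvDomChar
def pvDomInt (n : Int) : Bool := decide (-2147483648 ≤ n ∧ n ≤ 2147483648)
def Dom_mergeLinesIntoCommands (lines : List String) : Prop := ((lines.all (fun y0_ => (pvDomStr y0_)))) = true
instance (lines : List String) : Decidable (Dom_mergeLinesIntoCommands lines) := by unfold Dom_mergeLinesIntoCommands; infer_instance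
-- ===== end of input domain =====

-- B replaces A's accumulator loop (grow current command, flush on '.') by two passes: collect
-- the break indices, then slice the line list between breaks and join each group ("alternative").


-- ===== PORT A =====
-- A: one loop over lines, growing currentCommand and flushing it to ret on a '.'-terminated line.
def mergeLinesIntoCommands (lines : List String) : List String :=
  (lines.foldl
    (fun (st : String × List String) line =>
      if PySem.Str.pyGet? line (-1) = some '.' then ("", st.2 ++ [st.1 ++ " " ++ line])
      else (st.1 ++ " " ++ line, st.2))
    ("", [])).2

-- ===== PORT B =====
-- B: pass 1 collects break indices; pass 2 slices lines between breaks and joins each group.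
def mergeLinesIntoCommands_alt (lines : List String) : List String :=
  let breaks := (PySem.List.enumerate lines 0).filterMap
    (fun p => if PySem.Str.pyGet? p.2 (-1) = some '.' then some p.1 else none)
  (breaks.foldl
    (fun (st : Int × List String) i =>
      (i + 1, st.2 ++
        [String.join ((PySem.List.slice lines (some st.1) (some (i + 1))).map
          (fun l => " " ++ l))]))
    (0, [])).2

-- ===== PRECONDITION & SPEC =====
-- Pre_ excludes lists containing an empty line, on which Python A raises IndexError at line[-1].
def Pre_mergeLinesIntoCommands (lines : List String) : Prop := ∀ l ∈ lines, l ≠ ""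
instance (lines : List String) : Decidable (Pre_mergeLinesIntoCommands lines) := by
  unfold Pre_mergeLinesIntoCommands; infer_instance

def pvWitness_mergeLinesIntoCommands : List String := ["DATA LIST", " /x 1-2.", "EXECUTE."]

def Spec_mergeLinesIntoCommands (lines : List String) (out : List String) : Prop := out = mergeLinesIntoCommands_alt lines
instance (lines : List String) (out : List String) : Decidable (Spec_mergeLinesIntoCommands lines out) := by unfold Spec_mergeLinesIntoCommands; infer_instance

-- ===== CLAIM (what is proved, stated in full; the proofs are below) =====
def Claim_equal_mergeLinesIntoCommands : Prop := ∀ (lines : List String), Dom_mergeLinesIntoCommands lines → Pre_mergeLinesIntoCommands lines → Spec_mergeLinesIntoCommands lines (mergeLinesIntoCommands lines)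

-- ===== LEMMAS AND PROOFS =====

-- A's loop body, named
def fA (st : String × List String) (line : String) : String × List String :=
  if PySem.Str.pyGet? line (-1) = some '.' then ("", st.2 ++ [st.1 ++ " " ++ line])
  else (st.1 ++ " " ++ line, st.2)

theorem portA_eq (lines : List String) :
    mergeLinesIntoCommands lines = (lines.foldl fA ("", [])).2 := rfl

-- Reference recursion: A's loop as structural recursion on the remaining lines.
def goA (cur : String) : List String → List String
  | [] => []
  | l :: rest =>
    if PySem.Str.pyGet? l (-1) = some '.' then (cur ++ " " ++ l) :: goA "" rest
    else goA (cur ++ " " ++ l) rest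

theorem goA_cons (cur l : String) (rest : List String) :
    goA cur (l :: rest) =
      if PySem.Str.pyGet? l (-1) = some '.' then (cur ++ " " ++ l) :: goA "" rest
      else goA (cur ++ " " ++ l) rest := rfl

theorem foldA_eq_goA (lines : List String) :
    ∀ (cur : String) (ret : List String),
    (lines.foldl fA (cur, ret)).2 = ret ++ goA cur lines := by
  induction lines with
  | nil => intro cur ret; simp [goA]
  | cons l rest ih =>
    intro cur ret
    rw [List.foldl_cons, goA_cons]
    show (List.foldl fA
      (if PySem.Str.pyGet? l (-1) = some '.' then ("", ret ++ [cur ++ " " ++ l])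
       else (cur ++ " " ++ l, ret)) rest).2 = _
    by_cases h : PySem.Str.pyGet? l (-1) = some '.'
    · rw [if_pos h, if_pos h, ih]; simp
    · rw [if_neg h, if_neg h, ih]

-- B's loop body, named; bidx = the break-index list of pass 1 (starting index s)
def stepB (lines : List String) (st : Int × List String) (i : Int) : Int × List String :=
  (i + 1, st.2 ++
    [String.join ((PySem.List.slice lines (some st.1) (some (i + 1))).map
      (fun l => " " ++ l))])

def bidx (xs : List String) (s : Int) : List Int :=
  (PySem.List.enumerate xs s).filterMap
    (fun p => if PySem.Str.pyGet? p.2 (-1) = some '.' then some p.1 else none)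

theorem alt_eq (lines : List String) :
    mergeLinesIntoCommands_alt lines = ((bidx lines 0).foldl (stepB lines) (0, [])).2 := rfl

theorem bidx_cons (l : String) (rest : List String) (s : Int) :
    bidx (l :: rest) s =
      (if PySem.Str.pyGet? l (-1) = some '.' then [s] else []) ++ bidx rest (s + 1) := by
  unfold bidx
  rw [PySem.List.enumerate_cons]
  by_cases h : PySem.Str.pyGet? l (-1) = some '.'
  · rw [if_pos h, List.filterMap_cons_some (by show (if _ then _ else _) = _; rw [if_pos h])]
    rfl
  · rw [if_neg h, List.filterMap_cons_none (by show (if _ then _ else _) = _; rw [if_neg h])]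
    rfl

-- join of a group of lines, each prefixed by a space
def cat (g : List String) : String := String.join (g.map (fun l => " " ++ l))

theorem join_append_singleton (g : List String) (x : String) :
    String.join (g ++ [x]) = String.join g ++ x := by
  simp [String.join, List.foldl_append]

theorem cat_append_singleton (g : List String) (l : String) :
    cat (g ++ [l]) = cat g ++ " " ++ l := by
  simp [cat, join_append_singleton, String.append_assoc]

theorem seg_succ (lines : List String) (l : String) (rest : List String) (s0 s : Nat)
    (hd : lines.drop s = l :: rest) (hle : s0 ≤ s) :
    (lines.take (s + 1)).drop s0 = (lines.take s).drop s0 ++ [l] := by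
  have hs : s < lines.length := by
    by_contra hc
    simp [List.drop_eq_nil_of_le (Nat.le_of_not_lt hc)] at hd
  have h0 : (lines.drop s)[0]? = some l := by rw [hd]; rfl
  have hget : lines[s]? = some l := by simpa using h0
  rw [List.take_add_one, hget]
  have hlen : s0 ≤ (lines.take s).length := by
    simp [List.length_take]; omega
  rw [List.drop_append_of_le_length hlen]
  rfl

theorem main_lemma (lines : List String) :
    ∀ (tail : List String) (s0 s : Nat) (acc : List String),
    lines.drop s = tail → s0 ≤ s →
    ((bidx tail (s : Int)).foldl (stepB lines) ((s0 : Int), acc)).2 =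
      acc ++ goA (cat ((lines.take s).drop s0)) tail := by
  intro tail
  induction tail with
  | nil => intro s0 s acc _ _; simp [bidx, goA]
  | cons l rest ih =>
    intro s0 s acc hd hle
    have hdrest : lines.drop (s + 1) = rest := by
      have h2 := congrArg (List.drop 1) hd
      simpa [List.drop_drop] using h2
    have hseg := seg_succ lines l rest s0 s hd hle
    have h1 : ((s : Int) + 1) = (((s + 1 : Nat)) : Int) := by push_cast; ring
    rw [bidx_cons]
    by_cases h : PySem.Str.pyGet? l (-1) = some '.'
    · have hslice : PySem.List.slice lines (some (s0 : Int)) (some ((s : Int) + 1)) =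
          (lines.take (s + 1)).drop s0 := by
        rw [h1, PySem.List.slice_natCast, List.drop_take]
      have hstep : stepB lines ((s0 : Int), acc) (s : Int) =
          (((s + 1 : Nat) : Int), acc ++ [cat ((lines.take (s + 1)).drop s0)]) := by
        unfold stepB cat
        rw [hslice, h1]
      rw [if_pos h, List.singleton_append, List.foldl_cons, hstep, h1,
          ih (s + 1) (s + 1) _ hdrest (le_refl _)]
      have hempty : (lines.take (s + 1)).drop (s + 1) = [] := by
        apply List.drop_eq_nil_of_le
        simp [List.length_take]
      rw [hempty, goA_cons, if_pos h, hseg, cat_append_singleton]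
      show (acc ++ [cat ((lines.take s).drop s0) ++ " " ++ l]) ++ goA "" rest = _
      simp
    · rw [if_neg h, List.nil_append, h1, ih s0 (s + 1) acc hdrest (by omega),
          goA_cons, if_neg h, hseg, cat_append_singleton]

-- ===== VERDICT (by name: the statement is the Claim_ definition above) =====
theorem mergeLinesIntoCommands_spec : Claim_equal_mergeLinesIntoCommands := by
  intro lines _ _
  unfold Spec_mergeLinesIntoCommands
  rw [portA_eq, foldA_eq_goA, alt_eq]
  have hm := main_lemma lines lines 0 0 [] rfl (le_refl 0)
  simp only [Nat.cast_zero] at hm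
  rw [hm]
  rfl
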